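-- pv_equiv track=rewrite | github.com/sshreya99/Interview-OA | Prep/Amazon OAs/OA5.py | buyVolumes
-- ===== SOURCE A (Python) =====
-- def buyVolumes(daily_volumes: list[int]) -> list[list[int]]:
--     """
--     Determines which volumes can be purchased each day based on availability and prerequisites.
--
--     Args:
--         daily_volumes: List where daily_volumes[i] represents the volume number that becomes
--                       available on day i.
--
--     Returns:
--         List of lists where result[i] contains either:
--         - The volume numbers purchased on day i in ascending order
--         - [-1] if no volumes could be purchased on day i
--     """
--     total_volumes = len(daily_volumes)
--
--     # Track which volumes are available for purchase
--     volume_available = [False for _ in range(total_volumes)]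
--
--     # Store the volumes purchased each day
--     daily_purchases = [list() for _ in range(total_volumes)]
--
--     # Keep track of the next volume we need for sequential reading
--     next_required_volume = 0
--
--     for current_day, new_volume in enumerate(daily_volumes):
--         # Mark the new volume as available
--         volume_available[new_volume - 1] = True
--
--         # Purchase all available sequential volumes
--         while (next_required_volume < total_volumes and
--                volume_available[next_required_volume]):
--             daily_purchases[current_day].append(next_required_volume + 1)
--             next_required_volume += 1
--
--         # If no purchases were made today, append -1
--         if len(daily_purchases[current_day]) == 0:
--             daily_purchases[current_day].append(-1)
--
--     return daily_purchases
-- ===== SOURCE B (Python) =====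
-- def buyVolumes(daily_volumes: list[int]) -> list[list[int]]:
--     n = len(daily_volumes)
--     # first arrival day of each volume (volume v lives at index v-1)
--     arrival = [None] * n
--     for day, v in enumerate(daily_volumes):
--         if arrival[v - 1] is None:
--             arrival[v - 1] = day
--     result = [[] for _ in range(n)]
--     running_max = -1
--     for v in range(1, n + 1):
--         d = arrival[v - 1]
--         if d is None:
--             break
--         if d > running_max:
--             running_max = d
--         result[running_max].append(v)
--     for day in range(n):
--         if not result[day]:
--             result[day].append(-1)
--     return result
-- ===== Notes on version B (the rewrite author's own statement) =====
-- stated objective: alternative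
-- what changed: B replaces A's day-by-day simulation (availability flags plus a while-loop advancing a prefix pointer inside each day) by a volume-centric two-phase pass: record each volume's first arrival day, then sweep volumes 1..n keeping a running maximum of arrival days to assign each volume to its purchase day, finally marking the days with no purchase.
import Mathlib
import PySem

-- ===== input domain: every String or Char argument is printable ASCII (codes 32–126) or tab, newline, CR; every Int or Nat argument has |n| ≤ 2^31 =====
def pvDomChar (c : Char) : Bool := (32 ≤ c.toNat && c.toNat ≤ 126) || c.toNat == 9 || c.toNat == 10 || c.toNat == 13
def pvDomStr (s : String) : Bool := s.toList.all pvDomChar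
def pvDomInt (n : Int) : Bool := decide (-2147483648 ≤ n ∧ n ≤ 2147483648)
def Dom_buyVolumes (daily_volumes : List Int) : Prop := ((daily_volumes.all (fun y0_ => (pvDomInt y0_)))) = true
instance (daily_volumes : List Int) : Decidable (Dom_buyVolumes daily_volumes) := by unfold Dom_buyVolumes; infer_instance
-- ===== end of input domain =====

-- B replaces A's day-by-day simulation by a volume-centric two-phase pass (first-arrival
-- days, then a running-max sweep over volumes); objective: alternative decomposition of
-- the same O(n) task.

-- ===== PORT A =====
-- the inner 'while' loop of A: purchase sequential volumes while available
def buyA_while (total : Nat) (avail : List Bool) : Nat → Int → List Int → Int × List Int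
  | 0, next, todays => (next, todays)
  | fuel+1, next, todays =>
    if next < (total : Int) ∧ PySem.List.pyGetD avail next false = true then
      buyA_while total avail fuel (next + 1) (todays ++ [next + 1])
    else (next, todays)

def buyVolumes (daily_volumes : List Int) : List (List Int) :=
  let total := daily_volumes.length
  let fin := (PySem.List.enumerate daily_volumes 0).foldl
    (fun st dv =>
      let avail := PySem.List.pySetD st.1 (dv.2 - 1) true
      let res := buyA_while total avail total st.2.2 (PySem.List.pyGetD st.2.1 dv.1 [])
      let todays := if res.2.length = 0 then res.2 ++ [-1] else res.2
      (avail, PySem.List.pySetD st.2.1 dv.1 todays, res.1))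
    ((List.range total).map (fun _ => false),
     (List.range total).map (fun _ => ([] : List Int)), (0 : Int))
  fin.2.1

-- ===== PORT B =====
-- B's volume sweep with running maximum; stops at the first volume with no arrival day
def buyB_go (arrival : List (Option Int)) : List Int → Int → List (List Int) → List (List Int)
  | [], _, res => res
  | v :: vs, rm, res =>
    match PySem.List.pyGetD arrival (v - 1) none with
    | none => res
    | some d =>
      let rm' := if d > rm then d else rm
      buyB_go arrival vs rm' (PySem.List.pySetD res rm' (PySem.List.pyGetD res rm' [] ++ [v]))

def buyVolumes_alt (daily_volumes : List Int) : List (List Int) :=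
  let n := daily_volumes.length
  let arrival := (PySem.List.enumerate daily_volumes 0).foldl
    (fun arr dv => if PySem.List.pyGetD arr (dv.2 - 1) none = none
                   then PySem.List.pySetD arr (dv.2 - 1) (some dv.1) else arr)
    (List.replicate n (none : Option Int))
  let res := buyB_go arrival (PySem.List.pyRange 1 ((n : Int) + 1) 1) (-1)
               ((List.range n).map (fun _ => ([] : List Int)))
  res.map (fun l => if l.length = 0 then l ++ [-1] else l)

-- ===== PRECONDITION & SPEC =====
-- Pre_ admits exactly the inputs on which Python A returns normally; outside it (a volume
-- greater than the list length, or at most its negation) A raises IndexError.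
def Pre_buyVolumes (daily_volumes : List Int) : Prop :=
  ∀ v ∈ daily_volumes, 1 - (daily_volumes.length : Int) ≤ v ∧ v ≤ (daily_volumes.length : Int)
instance (daily_volumes : List Int) : Decidable (Pre_buyVolumes daily_volumes) := by
  unfold Pre_buyVolumes; infer_instance

def pvWitness_buyVolumes : List Int := [2, 1, 4, 3, 5]

def Spec_buyVolumes (daily_volumes : List Int) (out : List (List Int)) : Prop := out = buyVolumes_alt daily_volumes
instance (daily_volumes : List Int) (out : List (List Int)) : Decidable (Spec_buyVolumes daily_volumes out) := by unfold Spec_buyVolumes; infer_instance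

-- ===== CLAIM (what is proved, stated in full; the proofs are below) =====
def Claim_equal_buyVolumes : Prop := ∀ (daily_volumes : List Int), Dom_buyVolumes daily_volumes → Pre_buyVolumes daily_volumes → Spec_buyVolumes daily_volumes (buyVolumes daily_volumes)

-- ===== LEMMAS AND PROOFS =====

-- length of the maximal true prefix of p within [0, m)
def pcf (p : Nat → Bool) : Nat → Nat
  | 0 => 0
  | k+1 => if pcf p k = k ∧ p k = true then k+1 else pcf p k

-- normalized 0-based index of volume v in a length-n array (Python's v-1 with wraparound)
def nrm (n : Nat) (v : Int) : Nat := if 0 ≤ v - 1 then (v - 1).toNat else n - (1 - v).toNat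

def memD (a : List Nat) (d j : Nat) : Bool := decide (j ∈ a.take d)

-- number of prefix-complete volumes after d days
def mval (a : List Nat) (d : Nat) : Nat := pcf (memD a d) a.length

-- A's purchases on day i
def outDay (a : List Nat) (i : Nat) : List Int :=
  if mval a (i+1) = mval a i then [-1]
  else (List.range (mval a (i+1) - mval a i)).map (fun (t : Nat) => ((mval a i : Int) + (t : Int) + 1))

-- first arrival day of volume j (0-based), meaningful when j ∈ a
def ard (a : List Nat) (j : Nat) : Nat := (a.idxOf? j).getD 0

-- running maximum of arrival days over volumes 0..k-1
def mxd (a : List Nat) : Nat → Nat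
  | 0 => 0
  | k+1 => max (mxd a k) (ard a k)

-- B's group of volumes assigned to day dd after processing k volumes
def grp (a : List Nat) (k dd : Nat) : List Int :=
  ((List.range k).filter (fun j => mxd a (j+1) = dd)).map (fun (j : Nat) => ((j : Int) + 1))

lemma pcf_le (p : Nat → Bool) (m : Nat) : pcf p m ≤ m := by
  induction m with
  | zero => simp [pcf]
  | succ k ih => simp only [pcf]; split <;> omega

lemma pcf_true (p : Nat → Bool) (m : Nat) : ∀ i < pcf p m, p i = true := by
  induction m with
  | zero => simp [pcf]
  | succ k ih =>
    intro i hi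
    simp only [pcf] at hi
    split at hi
    · rename_i h
      obtain ⟨hpk, hk⟩ := h
      by_cases hik : i < k
      · exact ih i (by omega)
      · have : i = k := by omega
        exact this ▸ hk
    · exact ih i hi

lemma pcf_stop (p : Nat → Bool) (m : Nat) (h : pcf p m < m) : p (pcf p m) = false := by
  induction m with
  | zero => omega
  | succ k ih =>
    simp only [pcf] at h ⊢
    by_cases hc : pcf p k = k ∧ p k = true
    · rw [if_pos hc] at h; omega
    · rw [if_neg hc] at h ⊢
      by_cases hk : pcf p k = k
      · cases ht : p k with
        | false => rw [hk]; exact ht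
        | true => exact absurd ⟨hk, ht⟩ hc
      · have := pcf_le p k
        exact ih (by omega)

lemma pcf_fuel_mono (p : Nat → Bool) (m : Nat) : pcf p m ≤ pcf p (m+1) := by
  simp only [pcf]; split
  · have := pcf_le p m; omega
  · exact le_rfl

lemma pcf_le_of (p : Nat → Bool) (m : Nat) : ∀ k, (∀ i < k, p i = true) → k ≤ m →
    k ≤ pcf p m := by
  induction m with
  | zero => omega
  | succ j ih =>
    intro k h1 h2
    by_cases hk : k ≤ j
    · exact le_trans (ih k h1 hk) (pcf_fuel_mono p j)
    · have hkj : k = j + 1 := by omega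
      have hj : pcf p j = j :=
        le_antisymm (pcf_le p j) (ih j (fun i hi => h1 i (by omega)) le_rfl)
      have : pcf p (j+1) = j + 1 := by
        simp [pcf, hj, h1 j (by omega)]
      omega

lemma pcf_congr (p q : Nat → Bool) (m : Nat) (h : ∀ i < m, p i = q i) :
    pcf p m = pcf q m := by
  induction m with
  | zero => simp [pcf]
  | succ k ih =>
    have ih' := ih (fun i hi => h i (by omega))
    simp only [pcf, ih', h k (by omega)]

lemma pcf_mono_p (p q : Nat → Bool) (m : Nat) (h : ∀ i, p i = true → q i = true) :
    pcf p m ≤ pcf q m :=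
  pcf_le_of q m (pcf p m) (fun i hi => h i (pcf_true p m i hi)) (pcf_le p m)

lemma mval_zero (a : List Nat) : mval a 0 = 0 := by
  have h := pcf_true (memD a 0) a.length
  by_cases h0 : mval a 0 = 0
  · exact h0
  · have := h 0 (by unfold mval at h0; omega)
    simp [memD] at this

lemma mval_le (a : List Nat) (d : Nat) : mval a d ≤ a.length := pcf_le _ _

lemma mval_mono (a : List Nat) (d e : Nat) (h : d ≤ e) : mval a d ≤ mval a e := by
  apply pcf_mono_p
  intro i hi
  simp only [memD, decide_eq_true_eq] at hi ⊢
  have : a.take d = (a.take e).take d := by rw [List.take_take, Nat.min_eq_left h]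
  rw [this] at hi
  exact List.mem_of_mem_take hi

lemma mem_a_of_lt_V (a : List Nat) (j : Nat) (h : j < mval a a.length) : j ∈ a := by
  have := pcf_true (memD a a.length) a.length j h
  simpa [memD, List.take_length] using this

lemma ard_le_iff (a : List Nat) (j d : Nat) (hj : j ∈ a) :
    ard a j ≤ d ↔ j ∈ a.take (d+1) := by
  obtain ⟨m, hm⟩ := Option.isSome_iff_exists.mp (List.isSome_idxOf?.mpr hj)
  obtain ⟨hmlt, hget, hmin⟩ := List.idxOf?_eq_some_iff.mp hm
  have hard : ard a j = m := by simp [ard, hm]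
  rw [hard, List.mem_take_iff_getElem]
  constructor
  · intro hle
    exact ⟨m, by omega, hget⟩
  · rintro ⟨l, hl, hgl⟩
    by_contra hcon
    exact hmin l (by omega) hgl

lemma mxd_le_iff (a : List Nat) (k d : Nat) : mxd a k ≤ d ↔ ∀ i < k, ard a i ≤ d := by
  induction k with
  | zero => simp [mxd]
  | succ k ih =>
    simp only [mxd, Nat.max_le, ih]
    constructor
    · rintro ⟨h1, h2⟩ i hi
      by_cases hik : i < k
      · exact h1 i hik
      · have : i = k := by omega
        exact this ▸ h2
    · intro h
      exact ⟨fun i hi => h i (by omega), h k (by omega)⟩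

lemma lt_mval_iff (a : List Nat) (j d : Nat) (hjV : j < mval a a.length) :
    j < mval a (d+1) ↔ mxd a (j+1) ≤ d := by
  rw [mxd_le_iff]
  have hmem : ∀ i ≤ j, i ∈ a := fun i hi => mem_a_of_lt_V a i (by omega)
  constructor
  · intro h i hi
    rw [ard_le_iff a i d (hmem i (by omega))]
    have := pcf_true (memD a (d+1)) a.length i (by unfold mval at h; omega)
    simpa [memD] using this
  · intro h
    have : j + 1 ≤ pcf (memD a (d+1)) a.length := by
      apply pcf_le_of
      · intro i hi
        simp only [memD, decide_eq_true_eq]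
        exact (ard_le_iff a i d (hmem i (by omega))).mp (h i hi)
      · have := mval_le a a.length; omega
    unfold mval; omega

lemma filter_range_eq_range' (lo hi N : Nat) (h1 : lo ≤ hi) (h2 : hi ≤ N) :
    (List.range N).filter (fun j => decide (lo ≤ j ∧ j < hi)) = List.range' lo (hi - lo) := by
  apply List.Perm.eq_of_pairwise (le := (· < ·))
  · intro x y _ _ hxy hyx; omega
  · exact List.Pairwise.filter _ (List.pairwise_lt_range)
  · exact List.pairwise_lt_range'
  · apply (List.perm_ext_iff_of_nodup ((List.nodup_range.filter _)) List.nodup_range').mpr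
    intro j
    simp only [List.mem_filter, List.mem_range, List.mem_range'_1, decide_eq_true_eq]
    omega

lemma bridge (a : List Nat) (d : Nat) (hd : d < a.length) :
    (if (grp a (mval a a.length) d).length = 0 then grp a (mval a a.length) d ++ [-1]
     else grp a (mval a a.length) d) = outDay a d := by
  have hkey : ∀ j < mval a a.length,
      (decide (mxd a (j+1) = d)) = (decide (mval a d ≤ j ∧ j < mval a (d+1))) := by
    intro j hj
    have h1 : j < mval a (d+1) ↔ mxd a (j+1) ≤ d := lt_mval_iff a j d hj
    have h2 : j < mval a d ↔ mxd a (j+1) < d := by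
      cases d with
      | zero => simp [mval_zero]
      | succ e =>
        rw [lt_mval_iff a j e hj]
        omega
    rw [decide_eq_decide]
    omega
  have hgrp : grp a (mval a a.length) d =
      (List.range' (mval a d) (mval a (d+1) - mval a d)).map (fun (j : Nat) => ((j : Int) + 1)) := by
    unfold grp
    rw [List.filter_congr (fun j hj => hkey j (List.mem_range.mp hj)),
        filter_range_eq_range' _ _ _ (mval_mono a d (d+1) (by omega))
          (mval_mono a (d+1) a.length (by omega))]
  rw [hgrp]
  unfold outDay
  by_cases hq : mval a (d+1) = mval a d
  · simp [hq]
  · have hlt : mval a d < mval a (d+1) := by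
      have := mval_mono a d (d+1) (by omega); omega
    rw [if_neg (by simp [List.length_range']; omega), if_neg hq]
    rw [List.range'_eq_map_range, List.map_map]
    apply List.map_congr_left
    intro t _
    simp only [Function.comp_apply]
    push_cast
    ring

lemma pyIdx_nrm (n : Nat) (v : Int) (h1 : 1 - (n : Int) ≤ v) (h2 : v ≤ (n : Int)) (hn : 0 < n) :
    PySem.List.pyIdx? n (v - 1) = some (nrm n v) ∧ nrm n v < n := by
  have hidx : PySem.List.pyIdx? n (v - 1) = some (nrm n v) := by
    unfold PySem.List.pyIdx? nrm
    split_ifs <;> first | rfl | (simp only [Option.some.injEq]; omega) | (exfalso; omega)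
  have hlt : nrm n v < n := by
    unfold nrm; split_ifs <;> omega
  exact ⟨hidx, hlt⟩

lemma pySetD_idx {α : Type} (xs : List α) (i : Int) (k : Nat)
    (hidx : PySem.List.pyIdx? xs.length i = some k) (v : α) :
    PySem.List.pySetD xs i v = xs.set k v := by
  simp [PySem.List.pySetD, PySem.List.pySet?, hidx]

lemma pyGetD_idx {α : Type} (xs : List α) (i : Int) (k : Nat)
    (h : PySem.List.pyIdx? xs.length i = some k) (d : α) :
    PySem.List.pyGetD xs i d = xs.getD k d := by
  simp [PySem.List.pyGetD, PySem.List.pyGet?, h, List.getD_eq_getElem?_getD]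

lemma set_map_range {β : Type} (f : Nat → β) (n j : Nat) (v : β) (h : j < n) :
    ((List.range n).map f).set j v = (List.range n).map (fun i => if i = j then v else f i) := by
  apply List.ext_getElem
  · simp
  · intro i h1 h2
    have hi : i < n := by simpa using h2
    rw [List.getElem_set]
    simp only [List.getElem_map, List.getElem_range]
    by_cases hij : j = i
    · simp [hij]
    · rw [if_neg hij, if_neg (by omega)]

lemma idxOf?_append_singleton (l : List Nat) (x j : Nat) :
    (l ++ [x]).idxOf? j =
      if j ∈ l then l.idxOf? j else (if x = j then some l.length else none) := by
  induction l with
  | nil =>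
    simp only [List.nil_append, List.not_mem_nil, if_false]
    by_cases hxj : x = j <;>
      simp [List.idxOf?, List.findIdx?, List.findIdx?.go, hxj, beq_iff_eq]
  | cons y l ih =>
    have hcons : ∀ (t : List Nat), (y :: t).idxOf? j =
        if y = j then some 0 else (t.idxOf? j).map (· + 1) := by
      intro t
      by_cases hyj : y = j <;> simp [List.idxOf?, List.findIdx?_cons, hyj]
    rw [List.cons_append, hcons (l ++ [x]), hcons l, ih]
    by_cases hyj : y = j
    · simp [hyj]
    · have hyj' : ¬ j = y := fun h => hyj h.symm
      rw [if_neg hyj, if_neg hyj]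
      by_cases hjl : j ∈ l
      · rw [if_pos hjl, if_pos (List.mem_cons_of_mem _ hjl)]
      · have hniy : j ∉ y :: l := by simp [hjl, hyj']
        rw [if_neg hjl, if_neg hniy]
        split <;> simp

lemma ard_lt (a : List Nat) (j : Nat) (hj : j ∈ a) : ard a j < a.length := by
  obtain ⟨m, hm⟩ := Option.isSome_iff_exists.mp (List.isSome_idxOf?.mpr hj)
  obtain ⟨hmlt, _, _⟩ := List.idxOf?_eq_some_iff.mp hm
  simp [ard, hm, hmlt]

lemma mxd_lt (a : List Nat) (k : Nat) (hk : 0 < k) (h : ∀ i < k, i ∈ a) :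
    mxd a k < a.length := by
  induction k with
  | zero => omega
  | succ k ih =>
    have hlast : ard a k < a.length := ard_lt a k (h k (by omega))
    by_cases h0 : 0 < k
    · have := ih h0 (fun i hi => h i (by omega))
      simp only [mxd]; omega
    · have : k = 0 := by omega
      subst this
      simp [mxd]; omega

-- B's running maximum as an Int (-1 before any volume is processed)
def rmv (a : List Nat) (k : Nat) : Int := if k = 0 then -1 else (mxd a k : Int)

lemma rmv_step (a : List Nat) (k : Nat) :
    (if (ard a k : Int) > rmv a k then (ard a k : Int) else rmv a k) = rmv a (k+1) := by
  cases k with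
  | zero =>
    have h1 : rmv a 0 = -1 := rfl
    have h2 : rmv a 1 = (mxd a 1 : Int) := rfl
    have h3 : mxd a 1 = ard a 0 := by simp [mxd]
    rw [h1, h2, h3, if_pos (by omega)]
  | succ k =>
    have h1 : rmv a (k+1) = (mxd a (k+1) : Int) := rfl
    have h2 : rmv a (k+1+1) = (mxd a (k+1+1) : Int) := rfl
    have h3 : mxd a (k+1+1) = max (mxd a (k+1)) (ard a (k+1)) := rfl
    rw [h1, h2, h3]
    split_ifs <;> push_cast <;> omega

lemma grp_succ (a : List Nat) (k dd : Nat) :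
    grp a (k+1) dd = grp a k dd ++ (if mxd a (k+1) = dd then [((k : Int) + 1)] else []) := by
  unfold grp
  rw [List.range_succ, List.filter_append, List.map_append]
  congr 1
  simp only [List.filter_cons, List.filter_nil]
  split <;> simp_all

lemma b_loop (a : List Nat) (f : Nat) : ∀ k, a.length - k ≤ f → k ≤ mval a a.length →
    buyB_go ((List.range a.length).map (fun j => (a.idxOf? j).map (fun (m : Nat) => (m : Int))))
      (PySem.List.pyRange ((k : Int) + 1) ((a.length : Int) + 1) 1) (rmv a k)
      ((List.range a.length).map (grp a k))
    = (List.range a.length).map (grp a (mval a a.length)) := by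
  induction f with
  | zero =>
    intro k hf hk
    have hV := mval_le a a.length
    have hkn : k = a.length := by omega
    subst hkn
    rw [PySem.List.pyRange_one_eq_nil (by omega)]
    have hVk : mval a a.length = a.length := by omega
    rw [buyB_go, hVk]
  | succ f ih =>
    intro k hf hk
    have hV := mval_le a a.length
    by_cases hkn : k < a.length
    · rw [PySem.List.pyRange_one_cons (by omega), buyB_go]
      have harr : PySem.List.pyGetD
          ((List.range a.length).map (fun j => (a.idxOf? j).map (fun (m : Nat) => (m : Int))))
          ((k : Int) + 1 - 1) none = (a.idxOf? k).map (fun (m : Nat) => (m : Int)) := by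
        have : ((k : Int) + 1 - 1) = ((k : Nat) : Int) := by omega
        rw [this, PySem.List.pyGetD_natCast, PySem.List.getD_map_range _ _ _ _ hkn]
      by_cases hkV : k < mval a a.length
      · have hmem : k ∈ a := mem_a_of_lt_V a k hkV
        obtain ⟨m, hm⟩ := Option.isSome_iff_exists.mp (List.isSome_idxOf?.mpr hmem)
        have hardm : ard a k = m := by simp [ard, hm]
        rw [harr, hm]
        simp only [Option.map_some]
        have hrm : (if (m : Int) > rmv a k then (m : Int) else rmv a k) = rmv a (k+1) := by
          rw [← hardm]; exact rmv_step a k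
        rw [hrm]
        have hallmem : ∀ i < k + 1, i ∈ a := fun i hi => mem_a_of_lt_V a i (by omega)
        have hD : mxd a (k+1) < a.length := mxd_lt a (k+1) (by omega) hallmem
        have hrmc : rmv a (k+1) = ((mxd a (k+1) : Nat) : Int) := by
          unfold rmv; rw [if_neg (Nat.succ_ne_zero k)]
        rw [hrmc, PySem.List.pyGetD_natCast, PySem.List.pySetD_natCast,
            PySem.List.getD_map_range _ _ _ _ hD, set_map_range _ _ _ _ hD]
        have hres : (List.range a.length).map
            (fun i => if i = mxd a (k+1) then grp a k (mxd a (k+1)) ++ [(k : Int) + 1] else grp a k i)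
            = (List.range a.length).map (grp a (k+1)) := by
          apply List.map_congr_left
          intro dd _
          rw [grp_succ]
          by_cases hdd : dd = mxd a (k+1)
          · rw [if_pos hdd, if_pos hdd.symm, hdd]
          · rw [if_neg hdd, if_neg (by omega), List.append_nil]
        rw [hres]
        have : ((k : Int) + 1 + 1) = (((k+1 : Nat) : Int) + 1) := by push_cast; ring
        rw [this]
        exact ih (k+1) (by omega) (by omega)
      · have hkV' : k = mval a a.length := by omega
        have hnot : k ∉ a := by
          have h := pcf_stop (memD a a.length) a.length (by unfold mval at hkV'; omega)
          have h2 : memD a a.length k = false := by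
            unfold mval at hkV'; rw [hkV']; exact h
          simpa [memD, List.take_length] using h2
        rw [harr, List.idxOf?_eq_none_iff.mpr hnot, hkV']
        rfl
    · have hkn' : k = a.length := by omega
      subst hkn'
      rw [PySem.List.pyRange_one_eq_nil (by omega)]
      have hVk : mval a a.length = a.length := by omega
      rw [buyB_go, hVk]

lemma buyA_while_spec (n : Nat) (avail : List Bool) : ∀ (fuel next : Nat) (todays : List Int),
    n ≤ fuel + next → next ≤ n → (∀ i < next, avail.getD i false = true) →
    buyA_while n avail fuel (next : Int) todays =
      ((pcf (fun i => avail.getD i false) n : Int),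
       todays ++ (List.range (pcf (fun i => avail.getD i false) n - next)).map
         (fun (t : Nat) => ((next : Int) + (t : Int) + 1))) := by
  intro fuel
  induction fuel with
  | zero =>
    intro next todays hfuel hnext hpre
    have hF1 : next ≤ pcf (fun i => avail.getD i false) n := pcf_le_of _ _ _ hpre hnext
    have hF2 : pcf (fun i => avail.getD i false) n ≤ n := pcf_le _ _
    have hF : pcf (fun i => avail.getD i false) n = next := by omega
    rw [buyA_while, hF]
    simp
  | succ fuel ih =>
    intro next todays hfuel hnext hpre
    rw [buyA_while]
    rw [PySem.List.pyGetD_natCast]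
    by_cases hc : next < n ∧ avail.getD next false = true
    · rw [if_pos (by exact ⟨by exact_mod_cast hc.1, hc.2⟩)]
      have hpre' : ∀ i < next + 1, avail.getD i false = true := by
        intro i hi
        by_cases hin : i < next
        · exact hpre i hin
        · have : i = next := by omega
          exact this ▸ hc.2
      have hcast : ((next : Int) + 1) = ((next + 1 : Nat) : Int) := by push_cast; ring
      rw [hcast, ih (next + 1) (todays ++ [((next + 1 : Nat) : Int)]) (by omega) (by omega) hpre']
      have hF1 : next + 1 ≤ pcf (fun i => avail.getD i false) n :=
        pcf_le_of _ _ _ hpre' (by omega)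
      have hsub : pcf (fun i => avail.getD i false) n - next =
          (pcf (fun i => avail.getD i false) n - (next + 1)) + 1 := by omega
      rw [hsub, List.range_succ_eq_map, List.map_cons, List.map_map, List.append_assoc,
          List.singleton_append]
      congr 1
      congr 1
      refine congrArg₂ _ (by push_cast; ring) ?_
      apply List.map_congr_left
      intro t _
      simp only [Function.comp_apply]
      push_cast; ring
    · rw [if_neg (by
        intro hcon
        exact hc ⟨by exact_mod_cast hcon.1, hcon.2⟩)]
      have hF1 : next ≤ pcf (fun i => avail.getD i false) n := pcf_le_of _ _ _ hpre hnext
      have hF2 : pcf (fun i => avail.getD i false) n ≤ n := pcf_le _ _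
      have hF : pcf (fun i => avail.getD i false) n = next := by
        by_contra hne
        have hlt : next < pcf (fun i => avail.getD i false) n := by omega
        have htrue := pcf_true (fun i => avail.getD i false) n next hlt
        exact hc ⟨by omega, htrue⟩
      rw [hF]
      simp

lemma a_fold (xs : List Int) (hPre : Pre_buyVolumes xs) : ∀ d, d ≤ xs.length →
    (PySem.List.enumerate (xs.take d) 0).foldl
      (fun st dv =>
        let avail := PySem.List.pySetD st.1 (dv.2 - 1) true
        let res := buyA_while xs.length avail xs.length st.2.2 (PySem.List.pyGetD st.2.1 dv.1 [])
        let todays := if res.2.length = 0 then res.2 ++ [-1] else res.2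
        (avail, PySem.List.pySetD st.2.1 dv.1 todays, res.1))
      ((List.range xs.length).map (fun _ => false),
       (List.range xs.length).map (fun _ => ([] : List Int)), (0 : Int))
    = ((List.range xs.length).map (memD (xs.map (nrm xs.length)) d),
       (List.range xs.length).map
         (fun i => if i < d then outDay (xs.map (nrm xs.length)) i else []),
       ((mval (xs.map (nrm xs.length)) d : Nat) : Int)) := by
  intro d
  induction d with
  | zero =>
    intro _
    simp only [List.take_zero, PySem.List.enumerate_nil, List.foldl_nil]
    refine congrArg₂ _ ?_ (congrArg₂ _ ?_ ?_)
    · apply List.map_congr_left; intro _ _; simp [memD]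
    · apply List.map_congr_left; intro _ _; simp
    · simp [mval_zero]
  | succ d ihd =>
    intro hd
    have hdlt : d < xs.length := by omega
    have hn : 0 < xs.length := by omega
    rw [List.take_succ_eq_append_getElem hdlt, PySem.List.enumerate_append, List.foldl_append,
        ihd (by omega)]
    have hstart : ((0 : Int) + ((xs.take d).length : Int)) = (d : Int) := by
      rw [List.length_take_of_le (by omega)]; ring
    rw [hstart, PySem.List.enumerate_cons, PySem.List.enumerate_nil]
    simp only [List.foldl_cons, List.foldl_nil]
    have hb := hPre xs[d] (List.getElem_mem hdlt)
    obtain ⟨hidx, hklt⟩ := pyIdx_nrm xs.length xs[d] hb.1 hb.2 hn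
    set n := xs.length with hndef
    set a := xs.map (nrm n) with hadef
    have halen : a.length = n := by rw [hadef, List.length_map]
    have hak : a[d]'(by omega) = nrm n xs[d] := by simp [hadef]
    have htake : a.take (d+1) = a.take d ++ [a[d]'(by omega)] :=
      List.take_succ_eq_append_getElem (by omega)
    -- the new availability list
    have hidx' : PySem.List.pyIdx? ((List.range n).map (memD a d)).length (xs[d] - 1)
        = some (nrm n xs[d]) := by
      rw [List.length_map, List.length_range]; exact hidx
    have havail : PySem.List.pySetD ((List.range n).map (memD a d)) (xs[d] - 1) true
        = (List.range n).map (memD a (d+1)) := by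
      rw [pySetD_idx _ _ _ hidx', set_map_range _ _ _ _ hklt]
      apply List.map_congr_left
      intro j hj
      rw [← hak]
      unfold memD
      by_cases hjk : j = a[d]'(by omega)
      · rw [if_pos hjk]
        subst hjk
        have hm : a[d]'(by omega) ∈ a.take (d+1) := by
          rw [htake]
          exact List.mem_append_right _ (List.mem_singleton_self _)
        exact (decide_eq_true hm).symm
      · rw [if_neg hjk]
        rw [decide_eq_decide, htake, List.mem_append, List.mem_singleton]
        simp [hjk]
    -- today's starting (empty) purchase list
    have hget : PySem.List.pyGetD
        ((List.range n).map (fun i => if i < d then outDay a i else [])) ((d : Nat) : Int) []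
        = [] := by
      rw [PySem.List.pyGetD_natCast, PySem.List.getD_map_range _ _ _ _ hdlt, if_neg (by omega)]
    -- the while loop
    have hpre' : ∀ i < mval a d, ((List.range n).map (memD a (d+1))).getD i false = true := by
      intro i hi
      have hin : i < n := by have := mval_le a d; omega
      rw [PySem.List.getD_map_range _ _ _ _ hin]
      have h1 := pcf_true (memD a d) a.length i (by unfold mval at hi; omega)
      simp only [memD, decide_eq_true_eq] at h1 ⊢
      have : a.take d = (a.take (d+1)).take d := by
        rw [List.take_take, Nat.min_eq_left (by omega)]
      rw [this] at h1
      exact List.mem_of_mem_take h1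
    have hwhile := buyA_while_spec n ((List.range n).map (memD a (d+1))) n (mval a d) []
      (by have := mval_le a d; rw [← halen]; omega) (by have := mval_le a d; omega) hpre'
    have hpcf : pcf (fun i => ((List.range n).map (memD a (d+1))).getD i false) n
        = mval a (d+1) := by
      unfold mval
      rw [halen]
      apply pcf_congr
      intro i hi
      rw [PySem.List.getD_map_range _ _ _ _ hi]
    rw [hpcf] at hwhile
    have hmono : mval a d ≤ mval a (d+1) := mval_mono a d (d+1) (by omega)
    -- today's purchases equal outDay a d
    have htoday : (if ((List.range (mval a (d+1) - mval a d)).map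
          (fun (t : Nat) => ((mval a d : Int) + (t : Int) + 1))).length = 0
        then ((List.range (mval a (d+1) - mval a d)).map
          (fun (t : Nat) => ((mval a d : Int) + (t : Int) + 1))) ++ [-1]
        else ((List.range (mval a (d+1) - mval a d)).map
          (fun (t : Nat) => ((mval a d : Int) + (t : Int) + 1)))) = outDay a d := by
      unfold outDay
      by_cases hq : mval a (d+1) = mval a d
      · rw [if_pos hq]
        simp [hq]
      · rw [if_neg hq, if_neg (by simp; omega)]
    -- the updated purchases list
    have hset : PySem.List.pySetD
        ((List.range n).map (fun i => if i < d then outDay a i else [])) ((d : Nat) : Int)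
        (outDay a d)
        = (List.range n).map (fun i => if i < d + 1 then outDay a i else []) := by
      rw [PySem.List.pySetD_natCast, set_map_range _ _ _ _ hdlt]
      apply List.map_congr_left
      intro i hi
      by_cases hid : i = d
      · rw [if_pos hid, if_pos (by omega), hid]
      · rw [if_neg hid]
        by_cases hilt : i < d
        · rw [if_pos hilt, if_pos (by omega)]
        · rw [if_neg hilt, if_neg (by omega)]
    rw [hget, havail]
    simp only [hwhile, List.nil_append]
    rw [htoday, hset]
  -- end a_fold

lemma main_a (xs : List Int) (hPre : Pre_buyVolumes xs) :
    buyVolumes xs = (List.range xs.length).map (outDay (xs.map (nrm xs.length))) := by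
  have hexp : buyVolumes xs =
      ((PySem.List.enumerate xs 0).foldl
        (fun st dv =>
          let avail := PySem.List.pySetD st.1 (dv.2 - 1) true
          let res := buyA_while xs.length avail xs.length st.2.2 (PySem.List.pyGetD st.2.1 dv.1 [])
          let todays := if res.2.length = 0 then res.2 ++ [-1] else res.2
          (avail, PySem.List.pySetD st.2.1 dv.1 todays, res.1))
        ((List.range xs.length).map (fun _ => false),
         (List.range xs.length).map (fun _ => ([] : List Int)), (0 : Int))).2.1 := rfl
  rw [hexp]
  have ha := a_fold xs hPre xs.length le_rfl
  rw [List.take_length] at ha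
  rw [ha]
  apply List.map_congr_left
  intro i hi
  rw [if_pos (by have := List.mem_range.mp hi; omega)]

lemma arr_fold (xs : List Int) (hPre : Pre_buyVolumes xs) : ∀ d, d ≤ xs.length →
    (PySem.List.enumerate (xs.take d) 0).foldl
      (fun arr dv => if PySem.List.pyGetD arr (dv.2 - 1) none = none
                     then PySem.List.pySetD arr (dv.2 - 1) (some dv.1) else arr)
      (List.replicate xs.length (none : Option Int))
    = (List.range xs.length).map
        (fun j => (((xs.map (nrm xs.length)).take d).idxOf? j).map (fun (m : Nat) => (m : Int))) := by
  intro d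
  induction d with
  | zero =>
    intro _
    simp only [List.take_zero, PySem.List.enumerate_nil, List.foldl_nil]
    apply List.ext_getElem
    · simp
    · intro i h1 h2
      simp [List.idxOf?]
  | succ d ihd =>
    intro hd
    have hdlt : d < xs.length := by omega
    have hn : 0 < xs.length := by omega
    rw [List.take_succ_eq_append_getElem hdlt, PySem.List.enumerate_append, List.foldl_append,
        ihd (by omega)]
    have hstart : ((0 : Int) + ((xs.take d).length : Int)) = (d : Int) := by
      rw [List.length_take_of_le (by omega)]; ring
    rw [hstart, PySem.List.enumerate_cons, PySem.List.enumerate_nil]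
    simp only [List.foldl_cons, List.foldl_nil]
    -- the day-d step
    have hb := hPre xs[d] (List.getElem_mem hdlt)
    obtain ⟨hidx, hklt⟩ := pyIdx_nrm xs.length xs[d] hb.1 hb.2 hn
    set n := xs.length with hndef
    set a := xs.map (nrm n) with hadef
    have halen : a.length = n := by rw [hadef, List.length_map]
    have hak : a[d]'(by omega) = nrm n xs[d] := by simp [hadef]
    have hacc : ((List.range n).map
        (fun j => ((a.take d).idxOf? j).map (fun (m : Nat) => (m : Int)))).length = n := by simp
    have hidx' : PySem.List.pyIdx? ((List.range n).map
        (fun j => ((a.take d).idxOf? j).map (fun (m : Nat) => (m : Int)))).length (xs[d] - 1)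
        = some (nrm n xs[d]) := by rw [hacc]; exact hidx
    rw [pyGetD_idx _ _ _ hidx', PySem.List.getD_map_range _ _ _ _ hklt]
    have htake : a.take (d+1) = a.take d ++ [a[d]'(by omega)] :=
      List.take_succ_eq_append_getElem (by omega)
    by_cases hnone : (a.take d).idxOf? (nrm n xs[d]) = none
    · rw [if_pos (by rw [hnone]; rfl)]
      rw [pySetD_idx _ _ _ hidx', set_map_range _ _ _ _ hklt]
      apply List.map_congr_left
      intro j hj
      have hjn : j < n := List.mem_range.mp hj
      rw [htake, idxOf?_append_singleton, hak]
      by_cases hjk : j = nrm n xs[d]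
      · subst hjk
        rw [if_pos rfl, if_neg (List.idxOf?_eq_none_iff.mp hnone), if_pos rfl]
        simp [List.length_take_of_le (show d ≤ a.length by omega)]
      · rw [if_neg hjk]
        by_cases hjmem : j ∈ a.take d
        · rw [if_pos hjmem]
        · rw [if_neg hjmem, if_neg (fun h => hjk h.symm),
              List.idxOf?_eq_none_iff.mpr hjmem]
    · rw [if_neg (by
        intro hcon
        exact hnone (Option.map_eq_none_iff.mp hcon))]
      apply List.map_congr_left
      intro j hj
      rw [htake, idxOf?_append_singleton, hak]
      by_cases hjmem : j ∈ a.take d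
      · rw [if_pos hjmem]
      · have hk_mem : nrm n xs[d] ∈ a.take d := by
          by_contra hcon
          exact hnone (List.idxOf?_eq_none_iff.mpr hcon)
        have hjk : ¬ (nrm n xs[d] = j) := fun h => hjmem (h ▸ hk_mem)
        rw [if_neg hjmem, if_neg hjk, List.idxOf?_eq_none_iff.mpr hjmem]

lemma main_b (xs : List Int) (hPre : Pre_buyVolumes xs) :
    buyVolumes_alt xs =
      ((List.range xs.length).map
        (fun d => grp (xs.map (nrm xs.length)) (mval (xs.map (nrm xs.length)) xs.length) d)).map
        (fun l => if l.length = 0 then l ++ [-1] else l) := by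
  have hexp : buyVolumes_alt xs =
      (buyB_go ((PySem.List.enumerate xs 0).foldl
          (fun arr dv => if PySem.List.pyGetD arr (dv.2 - 1) none = none
                         then PySem.List.pySetD arr (dv.2 - 1) (some dv.1) else arr)
          (List.replicate xs.length (none : Option Int)))
        (PySem.List.pyRange 1 ((xs.length : Int) + 1) 1) (-1)
        ((List.range xs.length).map (fun _ => ([] : List Int)))).map
        (fun l => if l.length = 0 then l ++ [-1] else l) := rfl
  rw [hexp]
  have ha1 := arr_fold xs hPre xs.length le_rfl
  rw [List.take_length] at ha1
  set n := xs.length with hndef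
  set a := xs.map (nrm n) with hadef
  have halen : a.length = n := by rw [hadef, List.length_map]
  have htk : a.take n = a := by rw [← halen, List.take_length]
  rw [htk] at ha1
  rw [ha1]
  have h0 : (List.range n).map (fun _ => ([] : List Int)) = (List.range n).map (grp a 0) := by
    apply List.map_congr_left
    intro _ _
    simp [grp]
  rw [h0]
  have hb := b_loop a a.length 0 (by omega) (by omega)
  rw [halen] at hb
  have hr0 : rmv a 0 = -1 := rfl
  rw [hr0] at hb
  norm_num at hb
  rw [hb]

-- ===== VERDICT (by name: the statement is the Claim_ definition above) =====
theorem buyVolumes_spec : Claim_equal_buyVolumes := by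
  intro xs _ hPre
  unfold Spec_buyVolumes
  rw [main_a xs hPre, main_b xs hPre, List.map_map]
  apply List.map_congr_left
  intro d hd
  have hd' : d < xs.length := List.mem_range.mp hd
  have := bridge (xs.map (nrm xs.length)) d (by simpa using hd')
  simpa using this.symm
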